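-- pv_equiv track=rewrite | github.com/xnzvl/mSweeper | gui.py | adapt_coords
-- ===== SOURCE A (Python) =====
-- from typing import Callable, Optional, Tuple, Dict, List
--
-- ICON_PARTS = 13
--
-- def adapt_coords(
--     x: int,
--     y: int,
--     side: int,
--     shape: List[int],
--     flip_x: bool = False,
--     flip_y: bool = False
-- ) -> List[int]:
--     even = True
--     adapted_coords: List[int] = []
--
--     x0 = (0 if not flip_x else ICON_PARTS * side) + x + 1
--     y0 = (0 if not flip_y else ICON_PARTS * side) + y + 1
--
--     for coord in shape:
--         polarity = -1 if (even and flip_x) or (not even and flip_y) else 1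
--         adapted_coords.append(coord * side * polarity + (x0 if even else y0))
--
--         even = not even
--
--     return adapted_coords
-- ===== SOURCE B (Python) =====
-- from typing import List
--
-- ICON_PARTS = 13
--
-- def adapt_coords(
--     x: int,
--     y: int,
--     side: int,
--     shape: List[int],
--     flip_x: bool = False,
--     flip_y: bool = False
-- ) -> List[int]:
--     x0 = (ICON_PARTS * side if flip_x else 0) + x + 1
--     y0 = (ICON_PARTS * side if flip_y else 0) + y + 1
--     xmul = -side if flip_x else side
--     ymul = -side if flip_y else side
--
--     xs = [c * xmul + x0 for c in shape[0::2]]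
--     ys = [c * ymul + y0 for c in shape[1::2]]
--
--     out: List[int] = []
--     for a, b in zip(xs, ys):
--         out += (a, b)
--     out += xs[len(ys):]          # unpaired trailing x for odd-length shape
--     return out
-- ===== Notes on version B (the rewrite author's own statement) =====
-- stated objective: alternative
-- what changed: Replaces the single parity-toggling loop by two slice-based passes (shape[0::2] and shape[1::2] mapped with precomputed signed multipliers and offsets) whose results are interleaved back with zip plus the unpaired tail.
import Mathlib
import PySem

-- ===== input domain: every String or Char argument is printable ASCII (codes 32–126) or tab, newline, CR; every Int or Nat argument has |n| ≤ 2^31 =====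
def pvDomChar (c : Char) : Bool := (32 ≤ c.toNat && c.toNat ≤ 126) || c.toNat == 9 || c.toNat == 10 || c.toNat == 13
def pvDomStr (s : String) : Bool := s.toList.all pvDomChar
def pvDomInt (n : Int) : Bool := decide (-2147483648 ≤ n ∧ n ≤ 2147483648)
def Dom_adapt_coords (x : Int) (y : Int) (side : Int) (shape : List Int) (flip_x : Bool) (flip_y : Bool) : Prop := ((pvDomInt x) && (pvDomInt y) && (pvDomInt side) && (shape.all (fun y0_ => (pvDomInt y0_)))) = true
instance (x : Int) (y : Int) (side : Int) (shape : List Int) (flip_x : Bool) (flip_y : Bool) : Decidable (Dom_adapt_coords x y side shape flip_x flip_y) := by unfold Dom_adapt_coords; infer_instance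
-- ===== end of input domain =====

-- B replaces A's single parity-toggling loop by two slice passes (even/odd indexed
-- coordinates mapped with precomputed signed multipliers) interleaved back; alternative
-- decomposition, same cost.


-- ===== PORT A =====
def ICON_PARTS : Int := 13

-- A's for-loop over shape, with its state (even, adapted_coords)
def adaptLoopA (side x0 y0 : Int) (flip_x flip_y : Bool) : Bool → List Int → List Int → List Int
  | _, acc, [] => acc
  | even, acc, coord :: rest =>
      let polarity : Int := if (even && flip_x) || (!even && flip_y) then -1 else 1
      adaptLoopA side x0 y0 flip_x flip_y (!even)
        (acc ++ [coord * side * polarity + (if even then x0 else y0)]) rest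

def adapt_coords (x : Int) (y : Int) (side : Int) (shape : List Int) (flip_x : Bool) (flip_y : Bool) : List Int :=
  let x0 := (if !flip_x then 0 else ICON_PARTS * side) + x + 1
  let y0 := (if !flip_y then 0 else ICON_PARTS * side) + y + 1
  adaptLoopA side x0 y0 flip_x flip_y true [] shape

-- ===== PORT B =====
def adapt_coords_alt (x : Int) (y : Int) (side : Int) (shape : List Int) (flip_x : Bool) (flip_y : Bool) : List Int :=
  let x0 := (if flip_x then ICON_PARTS * side else 0) + x + 1
  let y0 := (if flip_y then ICON_PARTS * side else 0) + y + 1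
  let xmul := if flip_x then -side else side
  let ymul := if flip_y then -side else side
  let xs := ((PySem.List.slice? shape (some 0) none 2).getD []).map (fun c => c * xmul + x0)
  let ys := ((PySem.List.slice? shape (some 1) none 2).getD []).map (fun c => c * ymul + y0)
  ((xs.zip ys).foldl (fun acc p => acc ++ [p.1, p.2]) []) ++
    PySem.List.slice xs (some (ys.length : Int)) none

-- ===== PRECONDITION & SPEC =====
def Spec_adapt_coords (x : Int) (y : Int) (side : Int) (shape : List Int) (flip_x : Bool) (flip_y : Bool) (out : List Int) : Prop := out = adapt_coords_alt x y side shape flip_x flip_y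
instance (x : Int) (y : Int) (side : Int) (shape : List Int) (flip_x : Bool) (flip_y : Bool) (out : List Int) : Decidable (Spec_adapt_coords x y side shape flip_x flip_y out) := by unfold Spec_adapt_coords; infer_instance

-- ===== CLAIM (what is proved, stated in full; the proofs are below) =====
def Claim_equal_adapt_coords : Prop := ∀ (x : Int) (y : Int) (side : Int) (shape : List Int) (flip_x : Bool) (flip_y : Bool), Dom_adapt_coords x y side shape flip_x flip_y → Spec_adapt_coords x y side shape flip_x flip_y (adapt_coords x y side shape flip_x flip_y)

-- ===== LEMMAS AND PROOFS =====

-- even/odd-indexed elements of a list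
mutual
def pvEvens : List Int → List Int
  | [] => []
  | a :: t => a :: pvOdds t
def pvOdds : List Int → List Int
  | [] => []
  | _ :: t => pvEvens t
end

-- perfect shuffle of two lists
def pvMix : List Int → List Int → List Int
  | [], ys => ys
  | x :: xt, ys => x :: pvMix ys xt
termination_by xs ys => xs.length + ys.length
decreasing_by simp; omega

def pvFlat2 : List (Int × Int) → List Int
  | [] => []
  | (a, b) :: t => a :: b :: pvFlat2 t

theorem pvCore (xs : List Int) :
    (List.filterMap (fun k => xs[2 * k]?) (List.range ((xs.length + 1) / 2)) = pvEvens xs) ∧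
    (List.filterMap (fun k => xs[2 * k + 1]?) (List.range (xs.length / 2)) = pvOdds xs) := by
  induction xs with
  | nil => simp [pvEvens, pvOdds]
  | cons a t ih =>
      constructor
      · have hc : ((a :: t).length + 1) / 2 = t.length / 2 + 1 := by simp; omega
        rw [hc, List.range_succ_eq_map, List.filterMap_cons, List.filterMap_map]
        have hf : (fun k : Nat => (a :: t)[2 * (k + 1)]?) = (fun k => t[2 * k + 1]?) := by
          funext k
          have h : 2 * (k + 1) = (2 * k + 1) + 1 := by omega
          simp [h]
        simp only [Function.comp_def, hf, ih.2]
        simp [pvEvens]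
      · have hc : (a :: t).length / 2 = (t.length + 1) / 2 := by simp
        have hf : (fun k => (a :: t)[2 * k + 1]?) = (fun k => t[2 * k]?) := by
          funext k; simp
        rw [hc, hf, ih.1]
        simp [pvOdds]

theorem pvSliceEvens (xs : List Int) :
    (PySem.List.slice? xs (some 0) none 2).getD [] = pvEvens xs := by
  simp [PySem.List.slice?, PySem.List.sliceIndices]
  have hc : (if 0 < xs.length then (((xs.length : Int) + 2 - 1) / 2).toNat else 0)
      = (xs.length + 1) / 2 := by split_ifs with h <;> omega
  have hf : (fun k : Nat => xs[(2 * (k : Int)).toNat]?) = (fun k => xs[2 * k]?) := by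
    funext k; congr 1
  rw [hc, hf, (pvCore xs).1]

theorem pvSliceOdds (xs : List Int) :
    (PySem.List.slice? xs (some 1) none 2).getD [] = pvOdds xs := by
  rcases xs with _ | ⟨a, t⟩
  · simp [PySem.List.slice?, PySem.List.sliceIndices, pvOdds]
  · simp [PySem.List.slice?, PySem.List.sliceIndices]
    have hc : (if 0 < t.length then (((t.length : Int) + 2 - 1) / 2).toNat else 0)
        = (t.length + 1) / 2 := by split_ifs with h <;> omega
    have hf : (fun k : Nat => (a :: t)[((1 : Int) + 2 * (k : Int)).toNat]?)
        = (fun k => t[2 * k]?) := by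
      funext k
      have h : ((1 : Int) + 2 * (k : Int)).toNat = 2 * k + 1 := by omega
      rw [h]; simp
    rw [hc, hf, (pvCore t).1]
    simp [pvOdds]

theorem pvLenEO (xs : List Int) :
    (pvOdds xs).length ≤ (pvEvens xs).length ∧
    (pvEvens xs).length ≤ (pvOdds xs).length + 1 := by
  induction xs with
  | nil => simp [pvEvens, pvOdds]
  | cons a t ih => simp [pvEvens, pvOdds]; omega

theorem pvFoldlFlat2 (l : List (Int × Int)) (acc : List Int) :
    l.foldl (fun acc p => acc ++ [p.1, p.2]) acc = acc ++ pvFlat2 l := by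
  induction l generalizing acc with
  | nil => simp [pvFlat2]
  | cons p t ih => cases p; simp [pvFlat2, ih]

theorem pvWeaveMix (xs ys : List Int) (h1 : ys.length ≤ xs.length)
    (h2 : xs.length ≤ ys.length + 1) :
    pvFlat2 (xs.zip ys) ++ xs.drop ys.length = pvMix xs ys := by
  induction xs generalizing ys with
  | nil =>
      have : ys = [] := by
        cases ys with
        | nil => rfl
        | cons b bt => simp at h1
      subst this; simp [pvFlat2, pvMix]
  | cons x xt ih =>
      cases ys with
      | nil => simp [pvFlat2, pvMix]
      | cons y yt =>
          simp only [List.zip_cons_cons, pvFlat2, List.length_cons, List.drop_succ_cons,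
            List.cons_append]
          rw [pvMix, pvMix]
          simp at h1 h2
          rw [ih yt (by omega) (by omega)]

def pvG (side x0 y0 : Int) (fx fy : Bool) (e : Bool) (c : Int) : Int :=
  c * side * (if (e && fx) || (!e && fy) then -1 else 1) + (if e then x0 else y0)

theorem pvLoopChar (side x0 y0 : Int) (fx fy : Bool) (shape : List Int) :
    ∀ (e : Bool) (acc : List Int),
      adaptLoopA side x0 y0 fx fy e acc shape =
        acc ++ pvMix ((pvEvens shape).map (pvG side x0 y0 fx fy e))
                     ((pvOdds shape).map (pvG side x0 y0 fx fy (!e))) := by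
  induction shape with
  | nil => intro e acc; simp [adaptLoopA, pvEvens, pvOdds, pvMix]
  | cons c t ih =>
      intro e acc
      rw [adaptLoopA, ih]
      simp only [pvEvens, pvOdds, List.map_cons]
      rw [pvMix]
      simp [pvG, Bool.not_not, List.append_assoc]

-- ===== VERDICT (by name: the statement is the Claim_ definition above) =====
theorem adapt_coords_spec : Claim_equal_adapt_coords := by
  intro x y side shape fx fy _
  unfold Spec_adapt_coords adapt_coords adapt_coords_alt
  simp only []
  rw [pvSliceEvens, pvSliceOdds]
  set x0 := (if fx then ICON_PARTS * side else 0) + x + 1 with hx0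
  set y0 := (if fy then ICON_PARTS * side else 0) + y + 1 with hy0
  have hx0' : (if !fx then 0 else ICON_PARTS * side) + x + 1 = x0 := by
    cases fx <;> simp [hx0]
  have hy0' : (if !fy then 0 else ICON_PARTS * side) + y + 1 = y0 := by
    cases fy <;> simp [hy0]
  rw [hx0', hy0', pvLoopChar]
  have hmx : (pvEvens shape).map (pvG side x0 y0 fx fy true) =
      (pvEvens shape).map (fun c => c * (if fx then -side else side) + x0) := by
    apply List.map_congr_left; intro c _
    cases fx <;> cases fy <;> simp [pvG, mul_comm]
  have hmy : (pvOdds shape).map (pvG side x0 y0 fx fy (!true)) =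
      (pvOdds shape).map (fun c => c * (if fy then -side else side) + y0) := by
    apply List.map_congr_left; intro c _
    cases fx <;> cases fy <;> simp [pvG, mul_comm]
  rw [hmx, hmy]
  rw [pvFoldlFlat2, PySem.List.slice_from_natCast]
  simp only [List.nil_append]
  rw [← pvWeaveMix _ _ (by simpa using (pvLenEO shape).1) (by simpa using (pvLenEO shape).2)]
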